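-- pv_equiv track=rewrite | github.com/randolchance/PythonProjects | ProjectEulerSolutions/PE147/PE147-RectanglesinCross-hatchedGrid.py | countDiagRectangles
-- ===== SOURCE A (Python) =====
-- def countDiagRectangles(diagGrid):
--     D = len(diagGrid)
--     count = 0
--     for dy in range(1,D+1):
--         for dx in range(1,dy+1):
--             for j in range(0,D-(dy-1)):
--                 free = False
--                 next_false_abort = False
--                 for i in range(0,D-(dx-1)):
--                     if free:
--                         next_false_abort = True
--                     free = True
--                     for dy_j in range(0,dy):
--                         for dx_i in range(0,dx):
--                             try:
--                                 if diagGrid[j+dy_j][i+dx_i] == False: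
--                                     free = False
--                                     break
--                             except:
--                                 free = False
--                                 break
--                         if not free:
--                             break
--                     if free:
--                         count += 1 + int(dy!=dx)
--                     else:
--                         if next_false_abort:
--                             break
--     return(count)
-- ===== SOURCE B (Python) =====
-- def countDiagRectangles(diagGrid):
--     D = len(diagGrid)
--     total = 0
--     for dy in range(1, D + 1):
--         for j in range(0, D - dy + 1):
--             # column segment j .. j+dy-1 all free, per column c (out-of-row cells count as blocked)
--             cols = [all(c < len(diagGrid[j + r]) and diagGrid[j + r][c]
--                         for r in range(dy))
--                     for c in range(D)]
--             # run[c] = length of the maximal all-free column run starting at c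
--             run = [0] * (D + 1)
--             for c in range(D - 1, -1, -1):
--                 run[c] = run[c + 1] + 1 if cols[c] else 0
--             for dx in range(1, dy + 1):
--                 n = D - dx + 1
--                 i = 0
--                 while i < n and run[i] < dx:
--                     i += 1
--                 start = i
--                 while i < n and run[i] >= dx:
--                     i += 1
--                 total += (i - start) * (2 if dy != dx else 1)
--     return total
-- ===== Notes on version B (the rewrite author's own statement) =====
-- stated objective: faster
-- what changed: B precomputes, once per (height, top row), the per-column segment-freeness flags and their consecutive run lengths, so each rectangle test becomes an O(1) run-length lookup and the i-scan becomes a skip-then-count over the first free run, replacing A's cell-by-cell try/except rescan of every rectangle.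
import Mathlib
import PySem

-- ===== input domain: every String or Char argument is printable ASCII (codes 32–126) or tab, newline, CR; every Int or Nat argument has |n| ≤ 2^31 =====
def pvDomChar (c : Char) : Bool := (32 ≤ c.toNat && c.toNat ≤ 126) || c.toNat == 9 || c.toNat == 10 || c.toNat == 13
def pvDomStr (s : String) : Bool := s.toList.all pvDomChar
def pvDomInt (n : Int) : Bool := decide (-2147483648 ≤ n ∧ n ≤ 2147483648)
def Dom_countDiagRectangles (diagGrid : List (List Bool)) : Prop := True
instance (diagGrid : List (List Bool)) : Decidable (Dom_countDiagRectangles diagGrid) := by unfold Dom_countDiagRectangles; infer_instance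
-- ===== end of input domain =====

-- B precomputes, per (dy, j), the per-column "segment all free" flags and their run lengths, so each
-- rectangle test is O(1) instead of O(dy*dx) cells re-scanned with try/except (same results, faster).

-- ===== PORT A =====
-- innermost 'for dx_i' loop: try/except lookup, breaks at the first blocked (or missing) cell
def pvTryA (g : List (List Bool)) (r c : Nat) : Bool :=
  match PySem.List.pyGet? g (r : Int) with
  | none => false
  | some row =>
    match PySem.List.pyGet? row (c : Int) with
    | none => false
    | some v => v

def pvDxA (g : List (List Bool)) (jdy i : Nat) : Nat → Nat → Bool
  | _, 0 => true
  | dx_i, fuel+1 => if pvTryA g jdy (i + dx_i) then pvDxA g jdy i (dx_i+1) fuel else false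

-- 'for dy_j' loop, breaking as soon as free became False
def pvDyA (g : List (List Bool)) (j i dx : Nat) : Nat → Nat → Bool
  | _, 0 => true
  | dy_j, fuel+1 => if pvDxA g (j + dy_j) i 0 dx then pvDyA g j i dx (dy_j+1) fuel else false

-- 'for i' loop with the free / next_false_abort state and early break
def pvILoopA (g : List (List Bool)) (j dy dx : Nat) : Nat → Nat → Bool → Bool → Int → Int
  | _, 0, _, _, count => count
  | i, fuel+1, free, nfa, count =>
    let nfa2 := nfa || free
    let free2 := pvDyA g j i dx 0 dy
    if free2 then
      pvILoopA g j dy dx (i+1) fuel true nfa2 (count + 1 + (if dy ≠ dx then 1 else 0))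
    else if nfa2 then count
    else pvILoopA g j dy dx (i+1) fuel false nfa2 count

def countDiagRectangles (diagGrid : List (List Bool)) : Int :=
  let D := diagGrid.length
  (List.range D).foldl (fun count dy0 =>
    let dy := dy0 + 1
    (List.range dy).foldl (fun count dx0 =>
      let dx := dx0 + 1
      (List.range (D - (dy - 1))).foldl (fun count j =>
        pvILoopA diagGrid j dy dx 0 (D - (dx - 1)) false false count) count) count) 0

-- ===== PORT B =====
-- cols[c] = column segment j..j+dy-1 all free at column c (out-of-row cells blocked)
def pvColsB (g : List (List Bool)) (j dy D : Nat) : List Bool :=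
  (List.range D).map (fun c =>
    (List.range dy).all (fun r =>
      decide (c < (g.getD (j+r) []).length) && (g.getD (j+r) []).getD c false))

-- run[c] = length of the maximal all-free column run starting at c (Source B's backward loop)
def pvRunB (cols : List Bool) : List Nat :=
  cols.foldr (fun b acc => (if b then acc.headD 0 + 1 else 0) :: acc) []

-- first while loop: skip the prefix of non-free positions
def pvSkipB (run : List Nat) (dx i n : Nat) : Nat :=
  if _h : i < n then (if run.getD i 0 < dx then pvSkipB run dx (i+1) n else i) else i
termination_by n - i
decreasing_by omega

-- second while loop: advance over the free run
def pvScanB (run : List Nat) (dx i n : Nat) : Nat :=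
  if _h : i < n then (if dx ≤ run.getD i 0 then pvScanB run dx (i+1) n else i) else i
termination_by n - i
decreasing_by omega

def countDiagRectangles_alt (diagGrid : List (List Bool)) : Int :=
  let D := diagGrid.length
  (List.range D).foldl (fun total dy0 =>
    let dy := dy0 + 1
    (List.range (D - dy + 1)).foldl (fun total j =>
      let run := pvRunB (pvColsB diagGrid j dy D)
      (List.range dy).foldl (fun total dx0 =>
        let dx := dx0 + 1
        let n := D - dx + 1
        let start := pvSkipB run dx 0 n
        let stop := pvScanB run dx start n
        total + ((stop : Int) - (start : Int)) * (if dy ≠ dx then 2 else 1)) total) total) 0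

-- ===== PRECONDITION & SPEC =====
def Spec_countDiagRectangles (diagGrid : List (List Bool)) (out : Int) : Prop := out = countDiagRectangles_alt diagGrid
instance (diagGrid : List (List Bool)) (out : Int) : Decidable (Spec_countDiagRectangles diagGrid out) := by unfold Spec_countDiagRectangles; infer_instance

-- ===== CLAIM (what is proved, stated in full; the proofs are below) =====
def Claim_equal_countDiagRectangles : Prop := ∀ (diagGrid : List (List Bool)), Dom_countDiagRectangles diagGrid → Spec_countDiagRectangles diagGrid (countDiagRectangles diagGrid)

-- ===== LEMMAS AND PROOFS =====

-- B's per-cell test, the common denominator of both free-tests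
def pvCellB (g : List (List Bool)) (r c : Nat) : Bool :=
  decide (c < (g.getD r []).length) && (g.getD r []).getD c false

theorem pvTryA_eq_cellB (g : List (List Bool)) (r c : Nat) : pvTryA g r c = pvCellB g r c := by
  unfold pvTryA pvCellB
  cases hg : g[r]? with
  | none => simp [PySem.List.pyGet?_natCast, hg, List.getD_eq_getElem?_getD]
  | some row =>
    cases hc : row[c]? with
    | none =>
      have hlen : ¬ c < row.length := by
        intro hlt
        rw [List.getElem?_eq_getElem hlt] at hc
        simp at hc
      simp [PySem.List.pyGet?_natCast, hg, hc, List.getD_eq_getElem?_getD, hlen]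
    | some v =>
      have hlen : c < row.length := by
        by_contra hlt
        rw [List.getElem?_eq_none (by omega)] at hc
        simp at hc
      simp [PySem.List.pyGet?_natCast, hg, hc, List.getD_eq_getElem?_getD, hlen]

theorem all_congr_mem (l : List Nat) (f g : Nat → Bool) (h : ∀ x ∈ l, f x = g x) :
    l.all f = l.all g := by
  induction l with
  | nil => rfl
  | cons a t ih =>
    simp only [List.all_cons]
    rw [h a (List.mem_cons_self), ih (fun x hx => h x (List.mem_cons_of_mem a hx))]

theorem pvDxA_all (g : List (List Bool)) (jdy i : Nat) :
    ∀ fuel dx_i, pvDxA g jdy i dx_i fuel = (List.range fuel).all (fun t => pvTryA g jdy (i + (dx_i + t))) := by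
  intro fuel
  induction fuel with
  | zero => intro dx_i; simp [pvDxA]
  | succ f ih =>
    intro dx_i
    rw [List.range_succ_eq_map]
    simp only [pvDxA, List.all_cons, List.all_map, Function.comp]
    cases h : pvTryA g jdy (i + dx_i) with
    | false => simp [h]
    | true =>
      have harith : ∀ t : Nat, i + (dx_i + (t + 1)) = i + (dx_i + 1 + t) := by omega
      simp [h, ih (dx_i + 1), harith, Function.comp_def]

theorem pvDyA_all (g : List (List Bool)) (j i dx : Nat) :
    ∀ fuel dy_j, pvDyA g j i dx dy_j fuel = (List.range fuel).all (fun r => pvDxA g (j + (dy_j + r)) i 0 dx) := by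
  intro fuel
  induction fuel with
  | zero => intro dy_j; simp [pvDyA]
  | succ f ih =>
    intro dy_j
    rw [List.range_succ_eq_map]
    simp only [pvDyA, List.all_cons, List.all_map, Function.comp]
    cases h : pvDxA g (j + dy_j) i 0 dx with
    | false => simp [h]
    | true =>
      have harith : ∀ t : Nat, j + (dy_j + (t + 1)) = j + (dy_j + 1 + t) := by omega
      simp [h, ih (dy_j + 1), harith, Function.comp_def]

theorem all_comm_bool (l1 l2 : List Nat) (p : Nat → Nat → Bool) :
    l1.all (fun a => l2.all (fun b => p a b)) = l2.all (fun b => l1.all (fun a => p a b)) := by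
  rw [Bool.eq_iff_iff]
  simp only [List.all_eq_true]
  tauto

theorem pvColsB_getD (g : List (List Bool)) (j dy D c : Nat) (h : c < D) :
    (pvColsB g j dy D).getD c false = (List.range dy).all (fun r => pvCellB g (j+r) c) := by
  simp [pvColsB, pvCellB, List.getD_eq_getElem?_getD, List.getElem?_map, List.getElem?_range h]

theorem pvRunB_cons (b : Bool) (t : List Bool) :
    pvRunB (b :: t) = (if b then (pvRunB t).headD 0 + 1 else 0) :: pvRunB t := rfl

theorem pvRunB_char (cols : List Bool) :
    ∀ i dx, decide (dx + 1 ≤ (pvRunB cols).getD i 0) = (List.range (dx+1)).all (fun c => cols.getD (i+c) false) := by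
  induction cols with
  | nil =>
    intro i dx
    rw [List.range_succ_eq_map]
    simp [pvRunB]
  | cons b t ih =>
    intro i dx
    rw [pvRunB_cons]
    cases i with
    | zero =>
      cases b with
      | false =>
        rw [List.range_succ_eq_map]
        simp
      | true =>
        have hh : (pvRunB t).headD 0 = (pvRunB t).getD 0 0 := by
          cases pvRunB t <;> simp
        rw [List.getD_cons_zero, if_pos rfl, hh]
        cases dx with
        | zero => simp [List.range_succ_eq_map]
        | succ d =>
          have hdec : decide (d + 1 + 1 ≤ (pvRunB t).getD 0 0 + 1)
              = decide (d + 1 ≤ (pvRunB t).getD 0 0) := by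
            simp
          rw [hdec, ih 0 d]
          conv_rhs => rw [List.range_succ_eq_map]
          simp [List.all_map, Function.comp_def]
    | succ i' =>
      rw [List.getD_cons_succ]
      rw [ih i' dx]
      have harith : ∀ c : Nat, i' + 1 + c = (i' + c) + 1 := by omega
      simp [harith]

theorem pvScan_loop (g : List (List Bool)) (j dy dx n : Nat) (run : List Nat)
    (H : ∀ k, k < n → pvDyA g j k dx 0 dy = decide (dx ≤ run.getD k 0)) :
    ∀ fuel i nfa count, i + fuel = n →
      pvILoopA g j dy dx i fuel true nfa count
        = count + (if dy ≠ dx then (2:Int) else 1) * ((pvScanB run dx i n : Int) - i) := by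
  intro fuel
  induction fuel with
  | zero =>
    intro i nfa count h
    have hin : i = n := by omega
    rw [hin]
    have hs : pvScanB run dx n n = n := by rw [pvScanB]; simp
    simp [pvILoopA, hs]
  | succ f ih =>
    intro i nfa count h
    have hi : i < n := by omega
    have hstep : pvScanB run dx i n = if dx ≤ run.getD i 0 then pvScanB run dx (i+1) n else i := by
      conv_lhs => rw [pvScanB]
      rw [dif_pos hi]
    simp only [pvILoopA, Bool.or_true]
    rw [H i hi]
    by_cases hc : dx ≤ run.getD i 0
    · rw [if_pos (show decide (dx ≤ run.getD i 0) = true by simpa using hc)]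
      rw [ih (i+1) true _ (by omega)]
      rw [hstep, if_pos hc]
      push_cast
      split_ifs <;> ring
    · rw [if_neg (show ¬ decide (dx ≤ run.getD i 0) = true by simpa using hc)]
      rw [hstep, if_neg hc]
      simp

theorem pvSkip_loop (g : List (List Bool)) (j dy dx n : Nat) (run : List Nat)
    (H : ∀ k, k < n → pvDyA g j k dx 0 dy = decide (dx ≤ run.getD k 0)) :
    ∀ fuel i count, i + fuel = n →
      pvILoopA g j dy dx i fuel false false count
        = count + (if dy ≠ dx then (2:Int) else 1) *
            ((pvScanB run dx (pvSkipB run dx i n) n : Int) - (pvSkipB run dx i n : Int)) := by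
  intro fuel
  induction fuel with
  | zero =>
    intro i count h
    have hin : i = n := by omega
    rw [hin]
    have hk : pvSkipB run dx n n = n := by rw [pvSkipB]; simp
    have hs : pvScanB run dx n n = n := by rw [pvScanB]; simp
    simp [pvILoopA, hk, hs]
  | succ f ih =>
    intro i count h
    have hi : i < n := by omega
    have hskip : pvSkipB run dx i n = if run.getD i 0 < dx then pvSkipB run dx (i+1) n else i := by
      conv_lhs => rw [pvSkipB]
      rw [dif_pos hi]
    simp only [pvILoopA, Bool.or_false]
    rw [H i hi]
    by_cases hc : dx ≤ run.getD i 0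
    · rw [if_pos (show decide (dx ≤ run.getD i 0) = true by simpa using hc)]
      rw [pvScan_loop g j dy dx n run H f (i+1) false _ (by omega)]
      have hscan : pvScanB run dx i n = pvScanB run dx (i+1) n := by
        conv_lhs => rw [pvScanB]
        rw [dif_pos hi, if_pos hc]
      rw [hskip, if_neg (show ¬ run.getD i 0 < dx by omega), hscan]
      push_cast
      split_ifs <;> ring
    · rw [if_neg (show ¬ decide (dx ≤ run.getD i 0) = true by simpa using hc)]
      simp only [Bool.false_eq_true, if_false]
      rw [ih (i+1) count (by omega), hskip, if_pos (show run.getD i 0 < dx by omega)]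

theorem pvFree_eq_run (g : List (List Bool)) (D dy0 dx0 j : Nat)
    (_hdy : dy0 < D) (_hdx : dx0 ≤ dy0) (hD : D = g.length) :
    ∀ k, k < D - dx0 →
      pvDyA g j k (dx0+1) 0 (dy0+1)
        = decide (dx0+1 ≤ (pvRunB (pvColsB g j (dy0+1) D)).getD k 0) := by
  intro k hk
  rw [pvRunB_char]
  rw [pvDyA_all]
  have step1 : (List.range (dy0+1)).all (fun r => pvDxA g (j + (0 + r)) k 0 (dx0+1))
      = (List.range (dy0+1)).all (fun r => (List.range (dx0+1)).all (fun c => pvCellB g (j + r) (k + c))) := by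
    apply all_congr_mem
    intro r _
    rw [Nat.zero_add, pvDxA_all]
    apply all_congr_mem
    intro c _
    rw [Nat.zero_add, pvTryA_eq_cellB]
  rw [step1, all_comm_bool]
  apply all_congr_mem
  intro c hc
  rw [List.mem_range] at hc
  rw [pvColsB_getD g j (dy0+1) D (k + c) (by omega)]

theorem sum_map_range (n : Nat) (f : Nat → Int) :
    ((List.range n).map f).sum = ∑ x ∈ Finset.range n, f x := by
  induction n with
  | zero => simp
  | succ m ih => simp [List.range_succ, Finset.sum_range_succ, ih]

-- the per-(dy0, j) run list and the per-(dy0, dx0, j) contribution, shared by both sums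
def pvRunOf (g : List (List Bool)) (dy0 j : Nat) : List Nat := pvRunB (pvColsB g j (dy0+1) g.length)

def pvT (g : List (List Bool)) (dy0 dx0 j : Nat) : Int :=
  ((pvScanB (pvRunOf g dy0 j) (dx0+1)
      (pvSkipB (pvRunOf g dy0 j) (dx0+1) 0 (g.length - dx0)) (g.length - dx0) : Int)
    - (pvSkipB (pvRunOf g dy0 j) (dx0+1) 0 (g.length - dx0) : Int)) * (if dy0+1 ≠ dx0+1 then (2:Int) else 1)

theorem pvItemA (g : List (List Bool)) (dy0 dx0 j : Nat)
    (hdy : dy0 < g.length) (hdx : dx0 ≤ dy0) (count : Int) :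
    pvILoopA g j (dy0+1) (dx0+1) 0 (g.length - dx0) false false count = count + pvT g dy0 dx0 j := by
  rw [pvSkip_loop g j (dy0+1) (dx0+1) (g.length - dx0) (pvRunOf g dy0 j)
      (fun k hk => pvFree_eq_run g g.length dy0 dx0 j hdy hdx rfl k hk)
      (g.length - dx0) 0 count (Nat.zero_add _)]
  simp only [pvT]
  ring

theorem pvA_sum (g : List (List Bool)) :
    countDiagRectangles g
      = ∑ dy0 ∈ Finset.range g.length, ∑ dx0 ∈ Finset.range (dy0+1),
          ∑ j ∈ Finset.range (g.length - dy0), pvT g dy0 dx0 j := by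
  unfold countDiagRectangles
  simp only [Nat.add_sub_cancel]
  have h1 : ∀ dy0 ∈ List.range g.length, ∀ count : Int,
      (List.range (dy0+1)).foldl (fun count dx0 =>
        (List.range (g.length - dy0)).foldl (fun count j =>
          pvILoopA g j (dy0+1) (dx0+1) 0 (g.length - dx0) false false count) count) count
      = count + ∑ dx0 ∈ Finset.range (dy0+1), ∑ j ∈ Finset.range (g.length - dy0), pvT g dy0 dx0 j := by
    intro dy0 hdy count
    rw [List.mem_range] at hdy
    have h2 : ∀ dx0 ∈ List.range (dy0+1), ∀ count : Int,
        (List.range (g.length - dy0)).foldl (fun count j =>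
          pvILoopA g j (dy0+1) (dx0+1) 0 (g.length - dx0) false false count) count
        = count + ∑ j ∈ Finset.range (g.length - dy0), pvT g dy0 dx0 j := by
      intro dx0 hdx count
      rw [List.mem_range] at hdx
      have h3 : ∀ j ∈ List.range (g.length - dy0), ∀ count : Int,
          pvILoopA g j (dy0+1) (dx0+1) 0 (g.length - dx0) false false count = count + pvT g dy0 dx0 j :=
        fun j _ count => pvItemA g dy0 dx0 j hdy (by omega) count
      rw [PySem.List.foldl_congr_mem' _ _ _ _ h3, PySem.List.foldl_add, sum_map_range]
    rw [PySem.List.foldl_congr_mem' _ _ _ _ h2, PySem.List.foldl_add, sum_map_range]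
  rw [PySem.List.foldl_congr_mem' _ _ _ _ h1, PySem.List.foldl_add, sum_map_range]
  simp

theorem pvB_sum (g : List (List Bool)) :
    countDiagRectangles_alt g
      = ∑ dy0 ∈ Finset.range g.length, ∑ j ∈ Finset.range (g.length - (dy0+1) + 1),
          ∑ dx0 ∈ Finset.range (dy0+1), pvT g dy0 dx0 j := by
  unfold countDiagRectangles_alt
  have h1 : ∀ dy0 ∈ List.range g.length, ∀ total : Int,
      (List.range (g.length - (dy0+1) + 1)).foldl (fun total j =>
        (List.range (dy0+1)).foldl (fun total dx0 =>
          total + ((pvScanB (pvRunB (pvColsB g j (dy0+1) g.length)) (dx0+1)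
                      (pvSkipB (pvRunB (pvColsB g j (dy0+1) g.length)) (dx0+1) 0 (g.length - (dx0+1) + 1))
                      (g.length - (dx0+1) + 1) : Int)
                  - (pvSkipB (pvRunB (pvColsB g j (dy0+1) g.length)) (dx0+1) 0 (g.length - (dx0+1) + 1) : Int))
                * (if dy0+1 ≠ dx0+1 then (2:Int) else 1)) total) total
      = total + ∑ j ∈ Finset.range (g.length - (dy0+1) + 1), ∑ dx0 ∈ Finset.range (dy0+1), pvT g dy0 dx0 j := by
    intro dy0 hdy total
    rw [List.mem_range] at hdy
    have h2 : ∀ j ∈ List.range (g.length - (dy0+1) + 1), ∀ total : Int,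
        (List.range (dy0+1)).foldl (fun total dx0 =>
          total + ((pvScanB (pvRunB (pvColsB g j (dy0+1) g.length)) (dx0+1)
                      (pvSkipB (pvRunB (pvColsB g j (dy0+1) g.length)) (dx0+1) 0 (g.length - (dx0+1) + 1))
                      (g.length - (dx0+1) + 1) : Int)
                  - (pvSkipB (pvRunB (pvColsB g j (dy0+1) g.length)) (dx0+1) 0 (g.length - (dx0+1) + 1) : Int))
                * (if dy0+1 ≠ dx0+1 then (2:Int) else 1)) total
        = total + ∑ dx0 ∈ Finset.range (dy0+1), pvT g dy0 dx0 j := by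
      intro j _ total
      have h3 : ∀ dx0 ∈ List.range (dy0+1), ∀ total : Int,
          total + ((pvScanB (pvRunB (pvColsB g j (dy0+1) g.length)) (dx0+1)
                      (pvSkipB (pvRunB (pvColsB g j (dy0+1) g.length)) (dx0+1) 0 (g.length - (dx0+1) + 1))
                      (g.length - (dx0+1) + 1) : Int)
                  - (pvSkipB (pvRunB (pvColsB g j (dy0+1) g.length)) (dx0+1) 0 (g.length - (dx0+1) + 1) : Int))
                * (if dy0+1 ≠ dx0+1 then (2:Int) else 1)
          = total + pvT g dy0 dx0 j := by
        intro dx0 hdx total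
        rw [List.mem_range] at hdx
        have hn : g.length - (dx0+1) + 1 = g.length - dx0 := by omega
        rw [hn]
        rfl
      rw [PySem.List.foldl_congr_mem' _ _ _ _ h3, PySem.List.foldl_add, sum_map_range]
    rw [PySem.List.foldl_congr_mem' _ _ _ _ h2, PySem.List.foldl_add, sum_map_range]
  rw [PySem.List.foldl_congr_mem' _ _ _ _ h1, PySem.List.foldl_add, sum_map_range]
  simp

-- ===== VERDICT (by name: the statement is the Claim_ definition above) =====
theorem countDiagRectangles_spec : Claim_equal_countDiagRectangles := by
  intro g _
  unfold Spec_countDiagRectangles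
  rw [pvA_sum, pvB_sum]
  apply Finset.sum_congr rfl
  intro dy0 hdy
  rw [Finset.mem_range] at hdy
  rw [show g.length - (dy0+1) + 1 = g.length - dy0 from by omega]
  rw [Finset.sum_comm]
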